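-- pv_equiv track=rewrite | github.com/pm4py/pm4py-core | pm4py/algo/discovery/inductive/versions/dfg_only.py | add_to_most_probable_component
-- ===== SOURCE A (Python) =====
-- def add_to_most_probable_component(comps, act2, ingoing, outgoing):
--     """
--     Adds a lost component in parallel cut detection to the most probable component
--
--     Parameters
--     -------------
--     comps
--         Connected components
--     act2
--         Activity that has been missed
--     ingoing
--         Map of ingoing attributes
--     outgoing
--         Map of outgoing attributes
--
--     Returns
--     -------------
--     comps
--         Fixed connected components
--     """
--     sums = []
--     idx_max_sum = 0
--
--     for comp in comps:
--         sum = 0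
--         for act1 in comp:
--             if act1 in ingoing and act2 in ingoing[act1]:
--                sum = sum + ingoing[act1][act2]
--             if act1 in outgoing and act2 in outgoing[act1]:
--                 sum = sum + outgoing[act1][act2]
--         sums.append(sum)
--         if sums[-1] > sums[idx_max_sum]:
--             idx_max_sum = len(sums)-1
--
--     comps[idx_max_sum].add(act2)
--
--     return comps
-- ===== SOURCE B (Python) =====
-- def add_to_most_probable_component(comps, act2, ingoing, outgoing):
--     """Inverted traversal: build an activity -> component-indices map once, then
--     scatter each of act2's incident edge weights into a sums array and take the
--     first argmax, instead of rescoring every component member against both maps."""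
--     pos = {}
--     for i, comp in enumerate(comps):
--         for a in comp:
--             pos.setdefault(a, []).append(i)
--     sums = [0] * len(comps)
--     for nbr_map in (ingoing, outgoing):
--         for act1, nbrs in nbr_map.items():
--             if act2 in nbrs:
--                 v = nbrs[act2]
--                 for j in pos.get(act1, []):
--                     sums[j] += v
--     comps[sums.index(max(sums))].add(act2)
--     return comps
-- ===== Notes on version B (the rewrite author's own statement) =====
-- stated objective: alternative
-- what changed: B inverts the traversal: instead of scoring each component by probing both maps for every member (A), it builds an activity->component-indices map once, scatters each edge weight incident to act2 into a sums array indexed by component, and adds act2 to the first argmax component.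
import Mathlib
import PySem

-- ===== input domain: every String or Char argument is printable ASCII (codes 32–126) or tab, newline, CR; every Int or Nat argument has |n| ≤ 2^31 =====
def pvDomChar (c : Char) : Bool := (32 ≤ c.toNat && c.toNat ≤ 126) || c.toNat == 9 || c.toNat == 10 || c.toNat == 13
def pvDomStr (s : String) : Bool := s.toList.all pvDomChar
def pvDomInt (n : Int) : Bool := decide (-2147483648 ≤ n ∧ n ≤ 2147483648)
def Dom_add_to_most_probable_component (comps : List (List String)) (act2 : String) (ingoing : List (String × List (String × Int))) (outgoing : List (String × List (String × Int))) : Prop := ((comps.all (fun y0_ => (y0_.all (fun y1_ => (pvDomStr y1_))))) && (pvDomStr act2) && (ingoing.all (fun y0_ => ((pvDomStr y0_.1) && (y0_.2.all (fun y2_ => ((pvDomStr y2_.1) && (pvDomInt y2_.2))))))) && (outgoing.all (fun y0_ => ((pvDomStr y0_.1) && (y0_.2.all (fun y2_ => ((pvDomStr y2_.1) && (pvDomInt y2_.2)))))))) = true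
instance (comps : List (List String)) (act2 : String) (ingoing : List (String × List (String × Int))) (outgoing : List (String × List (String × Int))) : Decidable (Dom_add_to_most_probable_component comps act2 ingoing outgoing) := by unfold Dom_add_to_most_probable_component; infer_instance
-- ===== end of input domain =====

-- B inverts A's traversal: an activity→component-indices map is built once, then each edge
-- weight incident to act2 is scattered into a per-component sums array and the first argmax
-- component receives act2 ('alternative'; return-value equivalence: both Pythons mutate
-- comps[i] in place the same way and return it).

-- ===== PORT A =====
-- the body of A's inner loop ('for act1 in comp: …'), kept as a named helper
def pvStepA (act2 : String) (ingoing : List (String × List (String × Int))) (outgoing : List (String × List (String × Int))) (s : Int) (act1 : String) : Int :=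
  let s :=
    match List.lookup act1 ingoing with
    | some inner =>
      match List.lookup act2 inner with
      | some v => s + v
      | none => s
    | none => s
  match List.lookup act1 outgoing with
  | some inner =>
    match List.lookup act2 inner with
    | some v => s + v
    | none => s
  | none => s

def add_to_most_probable_component (comps : List (List String)) (act2 : String) (ingoing : List (String × List (String × Int))) (outgoing : List (String × List (String × Int))) : List (List String) :=
  -- state (sums, idx_max_sum); 'sums[-1]' / 'sums[idx_max_sum]' read via getD: the loop invariant
  -- keeps both indices in range, so the default is never read
  let st := comps.foldl (fun (p : List Int × Nat) comp =>
    let s := comp.foldl (pvStepA act2 ingoing outgoing) 0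
    let sums := p.1 ++ [s]
    (sums, if sums.getD p.2 0 < (sums.getLast?.getD 0) then sums.length - 1 else p.2)) ([], 0)
  -- comps[idx_max_sum].add(act2): IndexError on comps = [] is excluded by Pre_
  comps.modify st.2 (fun c => PySem.Set.add c act2)

-- ===== PORT B =====
-- one step of 'for j in pos.get(act1, []): sums[j] += v'; j comes from enumerate, so j ≥ 0
-- and j < len(sums): '.toNat' and 'getD/set' are exact there
def pvScatter (v : Int) (sums : List Int) (j : Int) : List Int :=
  sums.set j.toNat (sums.getD j.toNat 0 + v)

-- 'for act1, nbrs in nbr_map.items(): if act2 in nbrs: …' (one iteration of the outer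
-- 'for nbr_map in (ingoing, outgoing)' loop)
def pvScatterMap (act2 : String) (pos : PySem.Dict String (List Int)) (sums : List Int) (m : List (String × List (String × Int))) : List Int :=
  m.foldl (fun sums q =>
    match List.lookup act2 q.2 with
    | some v => (pos.getD q.1 []).foldl (pvScatter v) sums
    | none => sums) sums

def add_to_most_probable_component_alt (comps : List (List String)) (act2 : String) (ingoing : List (String × List (String × Int))) (outgoing : List (String × List (String × Int))) : List (List String) :=
  -- pos.setdefault(a, []).append(i)  =  pos[a] = pos.get(a, []) + [i]  =  Dict.modify
  let pos : PySem.Dict String (List Int) :=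
    (PySem.List.enumerate comps 0).foldl
      (fun d p => p.2.foldl (fun d a => d.modify a [] (fun l => l ++ [p.1])) d)
      PySem.Dict.empty
  let sums := pvScatterMap act2 pos (pvScatterMap act2 pos (List.replicate comps.length 0) ingoing) outgoing
  match PySem.List.max? sums (fun y => y) with
  | none => comps            -- comps = []: Python's max([]) raises; excluded by Pre_
  | some m =>
    match PySem.List.index? sums m with
    | some i => comps.modify i (fun c => PySem.Set.add c act2)
    | none => comps          -- unreachable: the maximum is a member of sums

-- ===== PRECONDITION & SPEC =====
-- Pre_ excludes comps = [] (A raises IndexError there) and association lists whose outer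
-- keys repeat — a Python dict cannot have duplicate keys, so those inputs never arise from
-- the original function's domain and first-match vs iteration order is unspecified on them.
def Pre_add_to_most_probable_component (comps : List (List String)) (act2 : String) (ingoing : List (String × List (String × Int))) (outgoing : List (String × List (String × Int))) : Prop :=
  comps ≠ [] ∧ (ingoing.map Prod.fst).Nodup ∧ (outgoing.map Prod.fst).Nodup
instance (comps : List (List String)) (act2 : String) (ingoing : List (String × List (String × Int))) (outgoing : List (String × List (String × Int))) : Decidable (Pre_add_to_most_probable_component comps act2 ingoing outgoing) := by unfold Pre_add_to_most_probable_component; infer_instance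
def pvWitness_add_to_most_probable_component : List (List String) × String × (List (String × List (String × Int))) × (List (String × List (String × Int))) :=
  ([["a"], ["b"]], "c", [("a", [("c", 3)])], [("b", [("c", 1)])])
def Spec_add_to_most_probable_component (comps : List (List String)) (act2 : String) (ingoing : List (String × List (String × Int))) (outgoing : List (String × List (String × Int))) (out : List (List String)) : Prop := out = add_to_most_probable_component_alt comps act2 ingoing outgoing
instance (comps : List (List String)) (act2 : String) (ingoing : List (String × List (String × Int))) (outgoing : List (String × List (String × Int))) (out : List (List String)) : Decidable (Spec_add_to_most_probable_component comps act2 ingoing outgoing out) := by unfold Spec_add_to_most_probable_component; infer_instance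

-- ===== CLAIM (what is proved, stated in full; the proofs are below) =====
def Claim_equal_add_to_most_probable_component : Prop := ∀ (comps : List (List String)) (act2 : String) (ingoing : List (String × List (String × Int))) (outgoing : List (String × List (String × Int))), Dom_add_to_most_probable_component comps act2 ingoing outgoing → Pre_add_to_most_probable_component comps act2 ingoing outgoing → Spec_add_to_most_probable_component comps act2 ingoing outgoing (add_to_most_probable_component comps act2 ingoing outgoing)

-- ===== LEMMAS AND PROOFS =====

-- total weight of the act1 → act2 / act2 → act1 edges recorded for act1 in one of the maps
def pvWgt (act2 : String) (d : List (String × List (String × Int))) (a : String) : Int :=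
  ((List.lookup a d).bind (fun inner => List.lookup act2 inner)).getD 0

theorem pv_lookup_eq_none {β : Type} (a : String) (l : List (String × β)) (h : a ∉ l.map Prod.fst) : List.lookup a l = none := by
  induction l with
  | nil => rfl
  | cons p t ih =>
    simp only [List.map_cons, List.mem_cons, not_or] at h
    simp [List.lookup, beq_eq_false_iff_ne.mpr h.1, ih h.2]

theorem pv_stepA_eq (act2 : String) (ingoing outgoing : List (String × List (String × Int)))
    (s : Int) (a : String) :
    pvStepA act2 ingoing outgoing s a = s + (pvWgt act2 ingoing a + pvWgt act2 outgoing a) := by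
  unfold pvStepA pvWgt
  cases h1 : List.lookup a ingoing with
  | none =>
    cases h2 : List.lookup a outgoing with
    | none => simp
    | some inner2 => cases h3 : List.lookup act2 inner2 <;> simp [h3]
  | some inner =>
    cases hv : List.lookup act2 inner with
    | none =>
      cases h2 : List.lookup a outgoing with
      | none => simp [hv]
      | some inner2 => cases h3 : List.lookup act2 inner2 <;> simp [hv, h3]
    | some v =>
      cases h2 : List.lookup a outgoing with
      | none => simp [hv]
      | some inner2 => cases h3 : List.lookup act2 inner2 <;> simp [hv, h3, add_assoc]

-- ---- the pos dictionary: pos.getD a [] lists, per component containing a, that component's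
-- ---- index, once per occurrence of a, in index order ----

def pvFlat (comps : List (List String)) (s : Int) (a : String) : List Int :=
  (PySem.List.enumerate comps s).flatMap (fun p => List.replicate (p.2.count a) p.1)

theorem pv_pos_getD (comps : List (List String)) (a : String) :
    ((PySem.List.enumerate comps 0).foldl
      (fun d p => p.2.foldl (fun d a => d.modify a [] (fun l => l ++ [p.1])) d)
      PySem.Dict.empty).getD a [] = pvFlat comps 0 a := by
  have hflat : ∀ (P : List (Int × List String)) (d : PySem.Dict String (List Int)),
      P.foldl (fun d p => p.2.foldl (fun d a => d.modify a [] (fun l => l ++ [p.1])) d) d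
        = (P.flatMap (fun p => p.2.map (fun x => (x, p.1)))).foldl
            (fun d q => d.modify q.1 [] (fun l => l ++ [q.2])) d := by
    intro P
    induction P with
    | nil => intro d; rfl
    | cons p t ih =>
      intro d
      simp only [List.foldl_cons, List.flatMap_cons, List.foldl_append, List.foldl_map]
      exact ih _
  rw [hflat, PySem.Dict.getD_foldl_modify_append]
  simp only [PySem.Dict.getD_empty, List.nil_append, pvFlat]
  rw [List.filter_flatMap, List.map_flatMap]
  congr 1
  funext p
  rw [List.filter_map, List.map_map]
  have : (List.filter ((fun q : String × Int => q.1 == a) ∘ fun x => (x, p.1)) p.2)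
      = p.2.filter (· == a) := by
    congr 1
  rw [this]
  have h2 : ((p.2.filter (· == a)).map ((fun q : String × Int => q.2) ∘ fun x => (x, p.1)))
      = (p.2.filter (· == a)).map (fun _ => p.1) := rfl
  rw [h2, List.map_const']
  congr 1
  rw [List.count_eq_countP, List.countP_eq_length_filter]

theorem pv_flat_mem (comps : List (List String)) (s : Int) (a : String) (j : Int)
    (hj : j ∈ pvFlat comps s a) : ∃ k : Nat, k < comps.length ∧ j = s + k := by
  unfold pvFlat at hj
  rw [List.mem_flatMap] at hj
  obtain ⟨p, hp, hrep⟩ := hj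
  rw [PySem.List.mem_enumerate_iff] at hp
  obtain ⟨k, hk, rfl⟩ := hp
  exact ⟨k, hk, (List.eq_of_mem_replicate hrep)⟩

theorem pv_flat_count (a : String) (comps : List (List String)) (s : Int) (k : Nat)
    (hk : k < comps.length) : (pvFlat comps s a).count (s + k) = (comps[k]).count a := by
  induction comps generalizing s k with
  | nil => simp at hk
  | cons c t ih =>
    unfold pvFlat
    rw [PySem.List.enumerate_cons, List.flatMap_cons, List.count_append]
    cases k with
    | zero =>
      have h1 : (List.replicate (c.count a) s).count (s + (0 : Nat)) = c.count a := by
        simp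
      have h2 : ((PySem.List.enumerate t (s + 1)).flatMap
          (fun p => List.replicate (p.2.count a) p.1)).count (s + (0 : Nat)) = 0 := by
        rw [List.count_eq_zero]
        intro hmem
        obtain ⟨k', _, heq⟩ := pv_flat_mem t (s + 1) a _ hmem
        omega
      simp only [h1, h2]
      simp
    | succ k' =>
      have h1 : (List.replicate (c.count a) s).count (s + ((k' + 1 : Nat) : Int)) = 0 := by
        have hne : s + ((k' + 1 : Nat) : Int) ≠ s := by push_cast; omega
        rw [List.count_replicate, if_neg (by simpa using hne)]
      have h2 := ih (s + 1) k' (by simpa using hk)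
      have harg : (s + 1) + (k' : Int) = s + ((k' + 1 : Nat) : Int) := by push_cast; ring
      rw [h1, Nat.zero_add]
      rw [harg] at h2
      unfold pvFlat at h2
      rw [h2]
      simp

-- ---- scatter over an index list ----

theorem pv_scatterIdx (v : Int) (L : List Int) (hL : ∀ j ∈ L, 0 ≤ j) (sums : List Int) :
    (L.foldl (pvScatter v) sums).length = sums.length ∧
    ∀ k : Nat, k < sums.length →
      (L.foldl (pvScatter v) sums).getD k 0 = sums.getD k 0 + v * L.count (k : Int) := by
  induction L generalizing sums with
  | nil => simp
  | cons j t ih =>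
    have hj : 0 ≤ j := hL j (by simp)
    have ht : ∀ x ∈ t, 0 ≤ x := fun x hx => hL x (by simp [hx])
    simp only [List.foldl_cons]
    obtain ⟨ihlen, ihval⟩ := ih ht (pvScatter v sums j)
    have hslen : (pvScatter v sums j).length = sums.length := by
      simp [pvScatter]
    refine ⟨by rw [ihlen, hslen], ?_⟩
    intro k hk
    rw [ihval k (by omega)]
    have hcnt : (j :: t).count (k : Int) = t.count (k : Int) + if j = (k : Int) then 1 else 0 := by
      rw [List.count_cons]; simp
    rw [hcnt]
    have hstep : (pvScatter v sums j).getD k 0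
        = sums.getD k 0 + (if j = (k : Int) then v else 0) := by
      unfold pvScatter
      by_cases hjk : j = (k : Int)
      · have hkn : j.toNat = k := by omega
        subst hkn
        have hlt : j.toNat < sums.length := hk
        rw [if_pos hjk, List.getD_eq_getElem?_getD, List.getElem?_set_self,
            List.getD_eq_getElem?_getD, List.getElem?_eq_getElem hlt]
        · simp
        · exact hlt
      · have hne : j.toNat ≠ k := by omega
        rw [if_neg hjk, List.getD_eq_getElem?_getD, List.getElem?_set_ne hne,
            List.getD_eq_getElem?_getD]
        ring
    rw [hstep]
    split_ifs <;> push_cast <;> ring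

-- Σ_{a ∈ c} (if a = key then v else 0) = v * count key c
theorem pv_sum_ite_count (c : List String) (key : String) (v : Int) :
    (c.map (fun a => if a = key then v else 0)).sum = v * (c.count key : Int) := by
  induction c with
  | nil => simp
  | cons b t ih =>
    rw [List.map_cons, List.sum_cons, ih, List.count_cons]
    by_cases hb : b = key
    · subst hb; simp; ring
    · rw [if_neg hb, if_neg (by simpa using hb)]
      push_cast; ring

-- pvWgt through one dict entry, outer keys distinct
theorem pv_wgt_cons (act2 key : String) (nbrs : List (String × Int))
    (t : List (String × List (String × Int))) (hk : key ∉ t.map Prod.fst) (a : String) :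
    pvWgt act2 ((key, nbrs) :: t) a
      = pvWgt act2 t a + (if a = key then ((List.lookup act2 nbrs).getD 0) else 0) := by
  unfold pvWgt
  by_cases hak : a = key
  · subst hak
    rw [pv_lookup_eq_none a t hk]
    simp [List.lookup]
  · simp [List.lookup, beq_eq_false_iff_ne.mpr hak, hak]

-- ---- scatter over a whole map equals the per-component gathered sums ----

theorem pv_scatterMap (comps : List (List String)) (act2 : String)
    (pos : PySem.Dict String (List Int)) (hpos : ∀ a, pos.getD a [] = pvFlat comps 0 a)
    (m : List (String × List (String × Int))) (hnd : (m.map Prod.fst).Nodup)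
    (sums : List Int) (hlen : sums.length = comps.length) :
    (pvScatterMap act2 pos sums m).length = sums.length ∧
    ∀ k : Nat, (hk : k < comps.length) →
      (pvScatterMap act2 pos sums m).getD k 0
        = sums.getD k 0 + ((comps[k]).map (pvWgt act2 m)).sum := by
  induction m generalizing sums with
  | nil =>
    refine ⟨rfl, fun k hk => ?_⟩
    have hz : (comps[k]).map (pvWgt act2 ([] : List (String × List (String × Int))))
        = (comps[k]).map (fun _ => (0 : Int)) :=
      List.map_congr_left (fun a _ => rfl)
    simp [pvScatterMap, hz]
  | cons q t ih =>
    obtain ⟨key, nbrs⟩ := q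
    simp only [List.map_cons, List.nodup_cons] at hnd
    have hsplit : ∀ k : Nat, (hk : k < comps.length) →
        ((comps[k]).map (pvWgt act2 ((key, nbrs) :: t))).sum
          = ((comps[k]).map (pvWgt act2 t)).sum
            + ((List.lookup act2 nbrs).getD 0) * ((comps[k]).count key : Int) := by
      intro k hk
      have : (comps[k]).map (pvWgt act2 ((key, nbrs) :: t))
          = (comps[k]).map (fun a => pvWgt act2 t a
              + (if a = key then ((List.lookup act2 nbrs).getD 0) else 0)) := by
        exact List.map_congr_left (fun a _ => pv_wgt_cons act2 key nbrs t hnd.1 a)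
      rw [this, PySem.List.sum_map_add_int, pv_sum_ite_count]
    unfold pvScatterMap
    simp only [List.foldl_cons]
    cases hv : List.lookup act2 nbrs with
    | none =>
      obtain ⟨ihlen, ihval⟩ := ih hnd.2 sums hlen
      refine ⟨ihlen, fun k hk => ?_⟩
      have := ihval k hk
      unfold pvScatterMap at this
      rw [this, hsplit k hk, hv]
      simp
    | some v =>
      have hposmem : ∀ j ∈ pos.getD key [], 0 ≤ j := by
        intro j hj
        rw [hpos key] at hj
        obtain ⟨k', _, rfl⟩ := pv_flat_mem comps 0 key j hj
        omega
      obtain ⟨slen, sval⟩ := pv_scatterIdx v (pos.getD key []) hposmem sums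
      obtain ⟨ihlen, ihval⟩ := ih hnd.2 _ (slen.trans hlen)
      refine ⟨ihlen.trans slen, fun k hk => ?_⟩
      have hval := ihval k hk
      unfold pvScatterMap at hval
      have hc : (pvFlat comps 0 key).count (k : Int) = (comps[k]).count key := by
        have h := pv_flat_count key comps 0 k hk
        simpa using h
      rw [hval, sval k (by omega), hpos key, hc, hsplit k hk, hv]
      simp only [Option.getD_some]
      ring

-- ---- A's running (sums, idx_max_sum) loop, isolated over the list of per-component sums ----

def pvAccum (S : List Int) : List Int × Nat :=
  S.foldl (fun (p : List Int × Nat) s =>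
    let sums := p.1 ++ [s]
    (sums, if sums.getD p.2 0 < (sums.getLast?.getD 0) then sums.length - 1 else p.2)) ([], 0)

theorem pvAccum_fst_aux (S : List Int) : ∀ pre j, (S.foldl (fun (p : List Int × Nat) s =>
    let sums := p.1 ++ [s]
    (sums, if sums.getD p.2 0 < (sums.getLast?.getD 0) then sums.length - 1 else p.2)) (pre, j)).1 = pre ++ S := by
  induction S with
  | nil => simp
  | cons x t ih =>
    intro pre j
    simp only [List.foldl_cons]
    exact (ih (pre ++ [x]) _).trans (by simp)

theorem pvAccum_concat (T : List Int) (x : Int) :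
    pvAccum (T ++ [x]) = (T ++ [x], if (T ++ [x]).getD (pvAccum T).2 0 < x then T.length else (pvAccum T).2) := by
  have h1 : (pvAccum T).1 = T := pvAccum_fst_aux T [] 0
  have h2 : pvAccum (T ++ [x]) = ((pvAccum T).1 ++ [x],
      if ((pvAccum T).1 ++ [x]).getD (pvAccum T).2 0 < (((pvAccum T).1 ++ [x]).getLast?.getD 0) then ((pvAccum T).1 ++ [x]).length - 1 else (pvAccum T).2) := by
    unfold pvAccum
    rw [List.foldl_append]
    rfl
  rw [h2, h1]
  simp

-- 'idx_max_sum is the first index attaining the maximum of sums'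
def pvFM (S : List Int) (j : Nat) : Prop :=
  ∃ h : j < S.length, (∀ i (hi : i < S.length), S[i] ≤ S[j]) ∧ ∀ i (hi : i < S.length), i < j → S[i] < S[j]

theorem pvAccum_FM (S : List Int) (h : S ≠ []) : pvFM S (pvAccum S).2 := by
  induction S using List.reverseRecOn with
  | nil => exact absurd rfl h
  | append_singleton T x ih =>
    rw [pvAccum_concat]
    rcases List.eq_nil_or_concat' T with hT | _
    · subst hT
      simp only [List.nil_append]
      have h0 : (pvAccum ([] : List Int)).2 = 0 := rfl
      rw [h0]
      have hfm0 : pvFM [x] 0 := by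
        refine ⟨by simp, ?_, ?_⟩ <;> intro i hi
        · simp only [List.length_singleton] at hi
          have : i = 0 := by omega
          subst this; simp
        · intro hlt; omega
      split <;> exact hfm0
    · have hTne : T ≠ [] := by rintro rfl; simp_all
      obtain ⟨hj, hmax, hstrict⟩ := ih hTne
      set jT := (pvAccum T).2 with hjT
      have hget : (T ++ [x]).getD jT 0 = T[jT] := by
        rw [List.getD_append _ _ _ _ hj, List.getD_eq_getElem]
      rw [hget]
      by_cases hcmp : T[jT] < x
      · simp only [if_pos hcmp]
        refine ⟨by simp, ?_, ?_⟩
        · intro i hi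
          rw [List.getElem_concat_length rfl _]
          simp only [List.length_append, List.length_singleton] at hi
          rcases Nat.lt_or_ge i T.length with hi' | hi'
          · rw [List.getElem_append_left hi']
            exact le_of_lt (lt_of_le_of_lt (hmax i hi') hcmp)
          · have : i = T.length := by omega
            subst this
            rw [List.getElem_concat_length rfl _]
        · intro i hi hlt
          rw [List.getElem_concat_length rfl _, List.getElem_append_left hlt]
          exact lt_of_le_of_lt (hmax i hlt) hcmp
      · simp only [if_neg hcmp]
        refine ⟨by simp; omega, ?_, ?_⟩
        · intro i hi
          rw [List.getElem_append_left hj]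
          simp only [List.length_append, List.length_singleton] at hi
          rcases Nat.lt_or_ge i T.length with hi' | hi'
          · rw [List.getElem_append_left hi']; exact hmax i hi'
          · have : i = T.length := by omega
            subst this
            rw [List.getElem_concat_length rfl _]
            omega
        · intro i hi hlt
          have hiT : i < T.length := lt_trans hlt hj
          rw [List.getElem_append_left hj, List.getElem_append_left hiT]
          exact hstrict i hiT hlt

theorem pv_max_eq (S : List Int) (j : Nat) (hfm : pvFM S j) :
    PySem.List.max? S (fun y => y) = some (S[j]'hfm.1) := by
  obtain ⟨hj, hmax, _⟩ := hfm
  have hne : S ≠ [] := by rintro rfl; simp at hj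
  cases hm : PySem.List.max? S (fun y => y) with
  | none => exact absurd ((PySem.List.max?_eq_none_iff _ _).mp hm) hne
  | some m =>
    have hmem : m ∈ S := PySem.List.max?_mem hm
    obtain ⟨i, hi, hieq⟩ := List.mem_iff_getElem.mp hmem
    have h1 : m ≤ S[j] := hieq ▸ hmax i hi
    have h2 : S[j] ≤ m := PySem.List.max?_isMax hm _ (List.getElem_mem hj)
    rw [le_antisymm h1 h2]

theorem pv_index_eq (S : List Int) (j : Nat) (hfm : pvFM S j) :
    PySem.List.index? S (S[j]'hfm.1) = some j := by
  obtain ⟨hj, _, hstrict⟩ := hfm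
  cases hk : PySem.List.index? S (S[j]'hj) with
  | none =>
    rw [PySem.List.index?_eq_none_iff] at hk
    exact absurd (List.getElem_mem hj) hk
  | some k =>
    obtain ⟨hkl, hkeq, hkfirst⟩ := PySem.List.getElem_of_index?_eq_some hk
    rcases Nat.lt_trichotomy k j with h | h | h
    · exact absurd hkeq (ne_of_lt (hstrict k hkl h))
    · rw [h]
    · exact absurd rfl (hkfirst j h)

-- ===== VERDICT (by name: the statement is the Claim_ definition above) =====
theorem add_to_most_probable_component_spec : Claim_equal_add_to_most_probable_component := by
  intro comps act2 ingoing outgoing _ hpre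
  obtain ⟨hne, hnd1, hnd2⟩ := hpre
  unfold Spec_add_to_most_probable_component add_to_most_probable_component add_to_most_probable_component_alt
  simp only []
  set pos : PySem.Dict String (List Int) :=
    (PySem.List.enumerate comps 0).foldl
      (fun d p => p.2.foldl (fun d a => d.modify a [] (fun l => l ++ [p.1])) d)
      PySem.Dict.empty with hposdef
  have hpos : ∀ a, pos.getD a [] = pvFlat comps 0 a := fun a => pv_pos_getD comps a
  -- A's per-component sums
  set S : List Int := comps.map (fun comp => comp.foldl (pvStepA act2 ingoing outgoing) 0) with hS
  -- B's sums array equals S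
  obtain ⟨len1, val1⟩ := pv_scatterMap comps act2 pos hpos ingoing hnd1
    (List.replicate comps.length 0) (by simp)
  obtain ⟨len2, val2⟩ := pv_scatterMap comps act2 pos hpos outgoing hnd2
    (pvScatterMap act2 pos (List.replicate comps.length 0) ingoing) (by simp [len1])
  have hsums : pvScatterMap act2 pos (pvScatterMap act2 pos (List.replicate comps.length 0) ingoing) outgoing = S := by
    apply List.ext_getElem
    · rw [len2, len1]
      simp [hS]
    · intro k hk1 hk2
      have hkc : k < comps.length := by
        rw [len2, len1] at hk1; simpa using hk1
      have hget : ∀ (l : List Int) (h : k < l.length), l[k] = l.getD k 0 := by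
        intro l h
        rw [List.getD_eq_getElem l 0 h]
      rw [hget _ hk1, hget _ hk2, val2 k hkc, val1 k hkc]
      have hSk : S.getD k 0 = (comps[k]).foldl (pvStepA act2 ingoing outgoing) 0 := by
        rw [hS, List.getD_eq_getElem _ 0 (by simpa using hkc), List.getElem_map]
      rw [hSk]
      have hfold : (comps[k]).foldl (pvStepA act2 ingoing outgoing) 0
          = ((comps[k]).map (fun a => pvWgt act2 ingoing a + pvWgt act2 outgoing a)).sum := by
        have := PySem.List.foldl_add (comps[k])
          (fun a => pvWgt act2 ingoing a + pvWgt act2 outgoing a) (0 : Int)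
        rw [show (comps[k]).foldl (pvStepA act2 ingoing outgoing) 0
            = (comps[k]).foldl (fun acc a => acc + (pvWgt act2 ingoing a + pvWgt act2 outgoing a)) 0
          from PySem.List.foldl_congr_mem _ _ _ _ (fun acc a _ => pv_stepA_eq act2 ingoing outgoing acc a),
          this]
        simp
      rw [hfold, PySem.List.sum_map_add_int]
      have hrep : (List.replicate comps.length (0 : Int)).getD k 0 = 0 := by
        simp [List.getD_eq_getElem?_getD]
      rw [hrep]
      ring
  rw [hsums]
  -- A's fold is pvAccum over S
  have hfoldA : (comps.foldl (fun (p : List Int × Nat) comp =>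
      let s := comp.foldl (pvStepA act2 ingoing outgoing) 0
      let sums := p.1 ++ [s]
      (sums, if sums.getD p.2 0 < (sums.getLast?.getD 0) then sums.length - 1 else p.2)) ([], 0)) = pvAccum S := by
    rw [hS]
    unfold pvAccum
    rw [List.foldl_map]
  rw [hfoldA]
  have hSne : S ≠ [] := by
    rw [hS]; simpa using hne
  have hfm := pvAccum_FM S hSne
  rw [pv_max_eq S _ hfm]
  simp only [pv_index_eq S _ hfm]
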